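-- pv_equiv track=rewrite | github.com/bchappet/dnfpy | src/experiments/plotMeanStd.py | generateLabels
-- ===== SOURCE A (Python) =====
-- def generateLabels(mod1,mod2,modality1,modality2):
--     labels = []
--     for m1 in mod1:
--         for m2 in mod2:
--             if m2 == "ModelNSpike":
--                 m2 = "SpikeDNF"
--             elif m2 == "ModelBsRsdnf":
--                 m2 = "CASAS-DNF"
--             labels.append(m2)
--     return labels
-- ===== SOURCE B (Python) =====
-- _RENAME = {"ModelNSpike": "SpikeDNF", "ModelBsRsdnf": "CASAS-DNF"}
--
-- def generateLabels(mod1, mod2, modality1, modality2):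
--     n2 = len(mod2)
--     labels = []
--     for k in range(len(mod1) * n2):
--         m = mod2[k % n2]
--         labels.append(_RENAME.get(m, m))
--     return labels
-- ===== Notes on version B (the rewrite author's own statement) =====
-- stated objective: alternative
-- what changed: B replaces the nested value loop and if/elif rename chain by a single flat loop over range(len(mod1)*len(mod2)) that indexes mod2 with modular arithmetic and renames through a lookup table (dict.get).
import Mathlib
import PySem

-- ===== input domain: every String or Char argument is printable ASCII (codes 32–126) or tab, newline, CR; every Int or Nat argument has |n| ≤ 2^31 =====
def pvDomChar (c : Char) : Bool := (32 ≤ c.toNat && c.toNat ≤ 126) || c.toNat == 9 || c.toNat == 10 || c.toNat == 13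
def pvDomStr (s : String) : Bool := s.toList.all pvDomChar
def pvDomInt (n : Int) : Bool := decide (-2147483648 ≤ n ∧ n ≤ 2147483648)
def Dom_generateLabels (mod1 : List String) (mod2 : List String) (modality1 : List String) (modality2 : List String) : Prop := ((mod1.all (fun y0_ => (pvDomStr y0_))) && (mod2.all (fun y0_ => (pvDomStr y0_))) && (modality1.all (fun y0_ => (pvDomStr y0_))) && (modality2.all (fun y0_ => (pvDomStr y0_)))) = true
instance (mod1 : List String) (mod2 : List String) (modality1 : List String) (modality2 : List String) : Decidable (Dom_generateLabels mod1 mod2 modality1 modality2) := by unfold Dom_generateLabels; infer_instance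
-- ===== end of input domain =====

-- B traverses by a single flat index loop with modular indexing and a rename lookup table instead of A's nested value loops with an if/elif chain (objective: alternative; return value proved equal on all inputs).
-- ===== PORT A =====
-- labels = []; for m1 in mod1: for m2 in mod2: if/elif rename; labels.append(m2)
def generateLabels (mod1 : List String) (mod2 : List String) (modality1 : List String) (modality2 : List String) : List String :=
  mod1.foldl (fun labels _m1 =>
    mod2.foldl (fun labels m2 =>
      let m2 := if m2 == "ModelNSpike" then "SpikeDNF"
                else if m2 == "ModelBsRsdnf" then "CASAS-DNF"
                else m2
      labels ++ [m2]) labels) []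

-- ===== PORT B =====
-- _RENAME = {"ModelNSpike": "SpikeDNF", "ModelBsRsdnf": "CASAS-DNF"}
def renameTable : PySem.Dict String String :=
  PySem.Dict.ofList [("ModelNSpike", "SpikeDNF"), ("ModelBsRsdnf", "CASAS-DNF")]

-- n2 = len(mod2); for k in range(len(mod1)*n2): m = mod2[k % n2]; labels.append(_RENAME.get(m, m))
-- (the index k % n2 is always in range, so the total pyGetD with default "" is exact here)
def generateLabels_alt (mod1 : List String) (mod2 : List String) (modality1 : List String) (modality2 : List String) : List String :=
  let n2 : Int := mod2.length
  (PySem.List.pyRange 0 ((mod1.length : Int) * n2) 1).foldl (fun labels k =>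
    let m := PySem.List.pyGetD mod2 (PySem.Int.mod k n2) ""
    labels ++ [PySem.Dict.getD renameTable m m]) []

-- ===== PRECONDITION & SPEC =====
def Spec_generateLabels (mod1 : List String) (mod2 : List String) (modality1 : List String) (modality2 : List String) (out : List String) : Prop := out = generateLabels_alt mod1 mod2 modality1 modality2
instance (mod1 : List String) (mod2 : List String) (modality1 : List String) (modality2 : List String) (out : List String) : Decidable (Spec_generateLabels mod1 mod2 modality1 modality2 out) := by unfold Spec_generateLabels; infer_instance

-- ===== CLAIM (what is proved, stated in full; the proofs are below) =====
def Claim_equal_generateLabels : Prop := ∀ (mod1 : List String) (mod2 : List String) (modality1 : List String) (modality2 : List String), Dom_generateLabels mod1 mod2 modality1 modality2 → Spec_generateLabels mod1 mod2 modality1 modality2 (generateLabels mod1 mod2 modality1 modality2)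

-- ===== LEMMAS AND PROOFS =====

-- the if/elif chain of A, as a helper for the proofs
def renameIf (m : String) : String :=
  if m == "ModelNSpike" then "SpikeDNF"
  else if m == "ModelBsRsdnf" then "CASAS-DNF"
  else m

lemma table_eq (m : String) : PySem.Dict.getD renameTable m m = renameIf m := by
  have h : renameTable = PySem.Dict.mk [("ModelNSpike", "SpikeDNF"), ("ModelBsRsdnf", "CASAS-DNF")] := by decide
  by_cases h1 : m = "ModelNSpike"
  · subst h1; decide
  · by_cases h2 : m = "ModelBsRsdnf"
    · subst h2; decide
    · have b1 : ("ModelNSpike" == m) = false := beq_false_of_ne (Ne.symm h1)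
      have b2 : ("ModelBsRsdnf" == m) = false := beq_false_of_ne (Ne.symm h2)
      have b1' : (m == "ModelNSpike") = false := beq_false_of_ne h1
      have b2' : (m == "ModelBsRsdnf") = false := beq_false_of_ne h2
      rw [h, renameIf, PySem.Dict.getD_eq_get?_getD, PySem.Dict.get?_mk_cons, b1,
          if_neg (by simp), PySem.Dict.get?_mk_cons, b2, if_neg (by simp)]
      simp only [b1', b2']
      rfl

lemma inner_fold (mod2 : List String) (acc : List String) :
    mod2.foldl (fun labels m2 =>
      let m2 := if m2 == "ModelNSpike" then "SpikeDNF"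
                else if m2 == "ModelBsRsdnf" then "CASAS-DNF"
                else m2
      labels ++ [m2]) acc = acc ++ mod2.map renameIf := by
  induction mod2 generalizing acc with
  | nil => simp
  | cons h t ih =>
    simp only [List.foldl, ih, List.map, renameIf, List.append_assoc, List.singleton_append]

lemma a_fold (mod1 mod2 : List String) (acc : List String) :
    mod1.foldl (fun labels _m1 =>
      mod2.foldl (fun labels m2 =>
        let m2 := if m2 == "ModelNSpike" then "SpikeDNF"
                  else if m2 == "ModelBsRsdnf" then "CASAS-DNF"
                  else m2
        labels ++ [m2]) labels) acc
    = acc ++ (List.replicate mod1.length (mod2.map renameIf)).flatten := by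
  induction mod1 generalizing acc with
  | nil => simp
  | cons h t ih =>
    simp only [List.foldl]
    rw [inner_fold, ih]
    simp [List.replicate]

-- one block of B's flat loop, starting at a multiple of len(mod2), yields the renamed mod2
lemma chunk (a : Int) (xs : List String) (hpos : 0 < xs.length) (hdvd : ((xs.length : Int)) ∣ a) :
    (PySem.List.pyRange a (a + xs.length) 1).map
      (fun k => renameIf (PySem.List.pyGetD xs (PySem.Int.mod k (xs.length : Int)) ""))
    = xs.map renameIf := by
  have hb : ((a + xs.length - a).toNat) = xs.length := by omega
  rw [PySem.List.pyRange_one a, hb, List.map_map]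
  have hmod : ∀ j ∈ List.range xs.length,
      ((fun k => renameIf (PySem.List.pyGetD xs (PySem.Int.mod k (xs.length : Int)) "")) ∘ (fun k : Nat => a + (k : Int))) j
      = (renameIf ∘ (fun j : Nat => PySem.List.pyGetD xs ((0:Int) + (j : Int)) "")) j := by
    intro j hj
    have hj' : (j : Int) < xs.length := by exact_mod_cast List.mem_range.mp hj
    have hm : PySem.Int.mod (a + (j : Int)) (xs.length : Int) = (j : Int) := by
      rw [PySem.Int.mod_eq_emod_of_pos (by exact_mod_cast hpos)]
      obtain ⟨c, hc⟩ := hdvd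
      rw [hc, add_comm, Int.add_mul_emod_self_left, Int.emod_eq_of_lt (by positivity) hj']
    simp [hm]
  rw [List.map_congr_left hmod, ← List.map_map]
  have base := PySem.List.map_pyGetD_pyRange_zero xs ""
  rw [PySem.List.pyRange_one 0] at base
  have base' : List.map (fun j : Nat => PySem.List.pyGetD xs (0 + (j:Int)) "") (List.range xs.length) = xs := by
    simpa [Function.comp_def] using base
  rw [base']

lemma b_range (m : Nat) (mod2 : List String) :
    (PySem.List.pyRange 0 ((m : Int) * mod2.length) 1).map
      (fun k => renameIf (PySem.List.pyGetD mod2 (PySem.Int.mod k (mod2.length : Int)) ""))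
    = (List.replicate m (mod2.map renameIf)).flatten := by
  rcases Nat.eq_zero_or_pos mod2.length with h0 | hpos
  · simp [PySem.List.pyRange_one_eq_nil, List.eq_nil_of_length_eq_zero h0]
  · induction m with
    | zero => simp [PySem.List.pyRange_one_eq_nil]
    | succ m ih =>
      have hcast : ((m + 1 : Nat) : Int) * mod2.length = (m : Int) * mod2.length + mod2.length := by
        push_cast; ring
      rw [hcast, PySem.List.pyRange_one_append 0 ((m : Int) * mod2.length)
            ((m : Int) * mod2.length + mod2.length) (by positivity)
            (le_add_of_nonneg_right (by positivity)),
          List.map_append, ih, chunk _ _ hpos ⟨m, mul_comm (m:Int) _⟩,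
          List.replicate_succ', List.flatten_append]
      simp

-- ===== VERDICT (by name: the statement is the Claim_ definition above) =====
theorem generateLabels_spec : Claim_equal_generateLabels := by
  intro mod1 mod2 _ _ _
  unfold Spec_generateLabels generateLabels generateLabels_alt
  rw [a_fold]
  simp only [PySem.List.foldl_append_singleton_eq_map, List.nil_append]
  have := b_range mod1.length mod2
  simp only [table_eq] at *
  rw [this]
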